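-- pv_equiv track=rewrite | github.com/pedromdsduarte/IST-Projects | Foundations of Programming/Project/ProjectoFP_SopaDeLetras/projecto_final.py | resposta_string
-- ===== SOURCE A (Python) =====
-- def ordena_res(res):
--     """ordena_res: resposta -> resposta
--     ordena_res(res) devolve a resposta res ordenada alfabeticamente segundo o primeiro elemento de cada tuplo (palavra)."""
--     maior_indice = len(res) - 1
--     nenhuma_troca = False
--     while not nenhuma_troca:
--         nenhuma_troca = True
--         for i in range(maior_indice):
--             if res[i] > res[i+1]:
--                 res[i], res[i+1] = res[i+1], res[i]
--                 nenhuma_troca = False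
--         maior_indice = maior_indice - 1
--     return res
--
-- def resposta_string(res):
--     """resposta_string: resposta -> string
--     resposta_string(res) devolve a representacao externa da resposta res:
--     uma cadeia de caracteres iniciada pelo parentesis recto esquerdo '[' e que contem
--     a descricao de cada elemento da resposta separados por virgulas e espaco ', ',
--     terminando com o parentesis recto direito ']'.
--     Cada elemento e representado por: '<'PALAVRA':'COORDENADA'>',
--     em que PALAVRA e a palavra encontrada, e COORDENADA a coordenada onde se encontra a palavra.
--     Os elementos estao necessariamente ordenados por ordem alfabetica das palavras."""
--     res_ordenado = ordena_res(res)
--     res_str = ''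
--     if len(res_ordenado) == 1:
--         return '[' + '<' + res_ordenado[0][0] + ':' + '(' + str(res_ordenado[0][1][0]) + ', ' + str(res_ordenado[0][1][1]) + ')' + '-' + res_ordenado[0][1][2] + '>' + ']'
--     else:
--         for t in range(len(res_ordenado)):
--             if t == 0:
--                 res_str = res_str + '[' + '<' + res_ordenado[t][0] + ':' + '(' + str(res_ordenado[t][1][0]) + ', ' + str(res_ordenado[t][1][1]) + ')' + '-' + res_ordenado[t][1][2] + '>, '
--             elif t == (len(res_ordenado)-1):
--                 res_str = res_str + '<' + res_ordenado[t][0] + ':' + '(' + str(res_ordenado[t][1][0]) + ', ' + str(res_ordenado[t][1][1]) + ')' + '-' + res_ordenado[t][1][2] + '>' + ']'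
--             else:
--                 res_str = res_str + '<' + res_ordenado[t][0] + ':' + '(' + str(res_ordenado[t][1][0]) + ', ' + str(res_ordenado[t][1][1]) + ')' + '-' + res_ordenado[t][1][2] + '>, '
--         return res_str
-- ===== SOURCE B (Python) =====
-- def resposta_string(res):
--     res.sort()
--     if len(res) == 0:
--         return ''
--     parts = ['<' + w + ':' + '(' + str(c[0]) + ', ' + str(c[1]) + ')' + '-' + c[2] + '>'
--              for (w, c) in res]
--     return '[' + ', '.join(parts) + ']'
-- ===== Notes on version B (the rewrite author's own statement) =====
-- stated objective: faster
-- what changed: Replaces the hand-written bubble sort by the built-in in-place sort and the positional first/last/middle separator branching by per-element formatting plus a single ', '.join.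
import Mathlib
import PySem

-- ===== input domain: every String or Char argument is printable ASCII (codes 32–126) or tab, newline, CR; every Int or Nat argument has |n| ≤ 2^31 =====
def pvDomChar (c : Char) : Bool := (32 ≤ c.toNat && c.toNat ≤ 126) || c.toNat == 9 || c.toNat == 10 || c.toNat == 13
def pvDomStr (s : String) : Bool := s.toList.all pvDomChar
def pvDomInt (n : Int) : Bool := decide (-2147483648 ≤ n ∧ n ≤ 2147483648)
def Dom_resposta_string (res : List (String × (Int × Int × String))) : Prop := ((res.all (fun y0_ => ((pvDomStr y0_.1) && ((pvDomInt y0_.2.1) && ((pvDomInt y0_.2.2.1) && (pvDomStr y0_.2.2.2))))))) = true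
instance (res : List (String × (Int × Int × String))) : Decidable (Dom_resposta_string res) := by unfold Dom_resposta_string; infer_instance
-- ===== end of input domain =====

-- B replaces A's O(n^2) hand-written bubble sort by the built-in sort and A's positional
-- first/last/middle branching by per-element pieces plus a single join (objective: faster;
-- equivalence is about the return value — both A and B sort the argument list in place in Python).

-- Python's lexicographic comparison of the tuples (word, (row, col, dir)) — shared semantic helper
def pvKey (p : String × (Int × Int × String)) : String ×ₗ (Int ×ₗ (Int ×ₗ String)) :=
  toLex (p.1, toLex (p.2.1, toLex (p.2.2.1, p.2.2.2)))

-- ===== PORT A =====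
-- one `for i in range(maior_indice)` adjacent-compare-swap pass of ordena_res;
-- the Bool is nenhuma_troca (true = no swap happened in this pass)
def pvPass : List (String × (Int × Int × String)) → Nat →
    List (String × (Int × Int × String)) × Bool
  | xs, 0 => (xs, true)
  | [], _ + 1 => ([], true)
  | [a], _ + 1 => ([a], true)
  | a :: b :: rest, n + 1 =>
    if pvKey b < pvKey a then
      (b :: (pvPass (a :: rest) n).1, false)
    else
      (a :: (pvPass (b :: rest) n).1, (pvPass (b :: rest) n).2)

-- the `while not nenhuma_troca` loop; the Nat is maior_indice (at 0 the pass makes no swap and exits)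
def pvWhile : Nat → List (String × (Int × Int × String)) → List (String × (Int × Int × String))
  | 0, xs => (pvPass xs 0).1
  | n + 1, xs =>
    let p := pvPass xs (n + 1)
    if p.2 then p.1 else pvWhile n p.1

def ordena_res (res : List (String × (Int × Int × String))) : List (String × (Int × Int × String)) :=
  pvWhile (res.length - 1) res

def pvD0 : String × (Int × Int × String) := ("", (0, 0, ""))

-- the body of A's `for t in range(len(res_ordenado))` loop (indices are nonnegative and in range,
-- so List.getD is exact for res_ordenado[t])
def pvLoopBody (ro : List (String × (Int × Int × String))) (res_str : String) (t : Nat) : String :=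
  if t = 0 then
    res_str ++ "[" ++ "<" ++ (ro.getD t pvD0).1 ++ ":" ++ "(" ++ PySem.Int.toStr (ro.getD t pvD0).2.1 ++ ", " ++ PySem.Int.toStr (ro.getD t pvD0).2.2.1 ++ ")" ++ "-" ++ (ro.getD t pvD0).2.2.2 ++ ">, "
  else if t = ro.length - 1 then
    res_str ++ "<" ++ (ro.getD t pvD0).1 ++ ":" ++ "(" ++ PySem.Int.toStr (ro.getD t pvD0).2.1 ++ ", " ++ PySem.Int.toStr (ro.getD t pvD0).2.2.1 ++ ")" ++ "-" ++ (ro.getD t pvD0).2.2.2 ++ ">" ++ "]"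
  else
    res_str ++ "<" ++ (ro.getD t pvD0).1 ++ ":" ++ "(" ++ PySem.Int.toStr (ro.getD t pvD0).2.1 ++ ", " ++ PySem.Int.toStr (ro.getD t pvD0).2.2.1 ++ ")" ++ "-" ++ (ro.getD t pvD0).2.2.2 ++ ">, "

def resposta_string (res : List (String × (Int × Int × String))) : String :=
  let ro := ordena_res res
  if ro.length = 1 then
    "[" ++ "<" ++ (ro.getD 0 pvD0).1 ++ ":" ++ "(" ++ PySem.Int.toStr (ro.getD 0 pvD0).2.1 ++ ", " ++ PySem.Int.toStr (ro.getD 0 pvD0).2.2.1 ++ ")" ++ "-" ++ (ro.getD 0 pvD0).2.2.2 ++ ">" ++ "]"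
  else
    (List.range ro.length).foldl (pvLoopBody ro) ""

-- ===== PORT B =====
-- one formatted piece '<' + w + ':' + '(' + str(c[0]) + ', ' + str(c[1]) + ')' + '-' + c[2] + '>'
def pvPiece (p : String × (Int × Int × String)) : String :=
  "<" ++ p.1 ++ ":" ++ "(" ++ PySem.Int.toStr p.2.1 ++ ", " ++ PySem.Int.toStr p.2.2.1 ++ ")" ++ "-" ++ p.2.2.2 ++ ">"

def resposta_string_alt (res : List (String × (Int × Int × String))) : String :=
  let s := PySem.List.sorted res pvKey false   -- res.sort(): Python's tuple order is pvKey's lexicographic order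
  if s.length = 0 then ""
  else "[" ++ PySem.Str.join ", " (s.map pvPiece) ++ "]"

-- ===== PRECONDITION & SPEC =====
def Spec_resposta_string (res : List (String × (Int × Int × String))) (out : String) : Prop := out = resposta_string_alt res
instance (res : List (String × (Int × Int × String))) (out : String) : Decidable (Spec_resposta_string res out) := by unfold Spec_resposta_string; infer_instance

-- ===== CLAIM (what is proved, stated in full; the proofs are below) =====
def Claim_equal_resposta_string : Prop := ∀ (res : List (String × (Int × Int × String))), Dom_resposta_string res → Spec_resposta_string res (resposta_string res)

-- ===== LEMMAS AND PROOFS =====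

theorem pvKey_inj : Function.Injective pvKey := by
  intro a b h
  obtain ⟨a1, a21, a221, a222⟩ := a
  obtain ⟨b1, b21, b221, b222⟩ := b
  simp only [pvKey, toLex_inj, Prod.ext_iff] at h
  obtain ⟨h1, h2, h3, h4⟩ := h
  simp [h1, h2, h3, h4]

-- pvPass permutes its input
theorem pvPass_perm : ∀ (n : Nat) (xs : List (String × (Int × Int × String))),
    ((pvPass xs n).1).Perm xs := by
  intro n
  induction n with
  | zero => intro xs; simp [pvPass]
  | succ n ih =>
    intro xs
    match xs with
    | [] => simp [pvPass]
    | [a] => simp [pvPass]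
    | a :: b :: rest =>
      by_cases h : pvKey b < pvKey a
      · simp only [pvPass, if_pos h]
        exact ((ih (a :: rest)).cons b).trans (List.Perm.swap a b rest)
      · simp only [pvPass, if_neg h]
        exact (ih (b :: rest)).cons a

-- a pass whose budget fits inside `front` leaves `back` untouched
theorem pvPass_split : ∀ (n : Nat) (front back : List (String × (Int × Int × String))),
    n + 1 ≤ front.length →
    pvPass (front ++ back) n = ((pvPass front n).1 ++ back, (pvPass front n).2) := by
  intro n
  induction n with
  | zero => intro front back _; rfl
  | succ n ih =>
    intro front back h
    match front with
    | [] => simp at h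
    | [a] => simp at h
    | a :: b :: f' =>
      by_cases hc : pvKey b < pvKey a
      · simp only [List.cons_append, pvPass, if_pos hc]
        have := ih (a :: f') back (by simp at h ⊢; omega)
        simp only [List.cons_append] at this
        simp [this]
      · simp only [List.cons_append, pvPass, if_neg hc]
        have := ih (b :: f') back (by simp at h ⊢; omega)
        simp only [List.cons_append] at this
        simp [this]

-- a no-swap pass over the whole list returns it unchanged and it is sorted
theorem pvPass_noswap : ∀ (n : Nat) (xs : List (String × (Int × Int × String))),
    xs.length ≤ n + 1 → (pvPass xs n).2 = true →
    (pvPass xs n).1 = xs ∧ xs.Pairwise (fun a b => pvKey a ≤ pvKey b) := by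
  intro n
  induction n with
  | zero =>
    intro xs h _
    match xs, h with
    | [], _ => simp [pvPass]
    | [a], _ => simp [pvPass]
  | succ n ih =>
    intro xs h hf
    match xs with
    | [] => simp [pvPass]
    | [a] => simp [pvPass]
    | a :: b :: rest =>
      by_cases hc : pvKey b < pvKey a
      · simp [pvPass, if_pos hc] at hf
      · simp only [pvPass, if_neg hc] at hf ⊢
        have hlen : (b :: rest).length ≤ n + 1 := by simp at h ⊢; omega
        obtain ⟨h1, h2⟩ := ih (b :: rest) hlen hf
        refine ⟨by simp [h1], ?_⟩
        refine List.Pairwise.cons ?_ h2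
        intro y hy
        rcases List.mem_cons.mp hy with hy | hy
        · subst hy; exact le_of_not_gt (by simpa using hc)
        · exact le_trans (le_of_not_gt (by simpa using hc)) (List.rel_of_pairwise_cons h2 hy)

-- a full-budget pass moves a maximum to the last position
theorem pvPass_max : ∀ (n : Nat) (xs front' : List (String × (Int × Int × String))) (m : String × (Int × Int × String)),
    xs.length ≤ n + 1 → (pvPass xs n).1 = front' ++ [m] →
    ∀ x ∈ front', pvKey x ≤ pvKey m := by
  intro n
  induction n with
  | zero =>
    intro xs front' m h he
    match xs, h with
    | [], _ => simp [pvPass] at he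
    | [a], _ =>
      simp only [pvPass] at he
      rcases front' with _ | ⟨p, f⟩
      · intro x hx; simp at hx
      · exfalso
        simp only [List.cons_append, List.cons.injEq] at he
        exact absurd he.2.symm (by simp)
  | succ n ih =>
    intro xs front' m h he
    match xs with
    | [] => simp [pvPass] at he
    | [a] =>
      simp only [pvPass] at he
      rcases front' with _ | ⟨p, f⟩
      · intro x hx; simp at hx
      · exfalso
        simp only [List.cons_append, List.cons.injEq] at he
        exact absurd he.2.symm (by simp)
    | a :: b :: rest =>
      have hlen2 : (rest.length + 2) ≤ n + 2 := by simpa using h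
      by_cases hc : pvKey b < pvKey a
      · simp only [pvPass, if_pos hc] at he
        match front', he with
        | [], he => intro x hx; simp at hx
        | p :: f'', he =>
          simp only [List.cons_append, List.cons.injEq] at he
          obtain ⟨hpb, hys⟩ := he
          have hih := ih (a :: rest) f'' m (by simpa using Nat.le_of_succ_le_succ hlen2) hys
          intro x hx
          rcases List.mem_cons.mp hx with hx | hx
          · subst hx; subst hpb
            have ham : a ∈ f'' ++ [m] := by
              rw [← hys]; exact ((pvPass_perm n (a :: rest)).mem_iff).mpr (by simp)
            rcases List.mem_append.mp ham with haf | ham1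
            · exact le_of_lt (lt_of_lt_of_le hc (hih a haf))
            · simp at ham1; subst ham1; exact le_of_lt hc
          · exact hih x hx
      · simp only [pvPass, if_neg hc] at he
        match front', he with
        | [], he => intro x hx; simp at hx
        | p :: f'', he =>
          simp only [List.cons_append, List.cons.injEq] at he
          obtain ⟨hpa, hys⟩ := he
          have hih := ih (b :: rest) f'' m (by simpa using Nat.le_of_succ_le_succ hlen2) hys
          intro x hx
          rcases List.mem_cons.mp hx with hx | hx
          · subst hx; subst hpa
            have hbm : b ∈ f'' ++ [m] := by
              rw [← hys]; exact ((pvPass_perm n (b :: rest)).mem_iff).mpr (by simp)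
            rcases List.mem_append.mp hbm with hbf | hbm1
            · exact le_trans (le_of_not_gt (by simpa using hc)) (hih b hbf)
            · simp at hbm1; subst hbm1; exact le_of_not_gt (by simpa using hc)
          · exact hih x hx

theorem pvWhile_perm : ∀ (n : Nat) (xs : List (String × (Int × Int × String))),
    (pvWhile n xs).Perm xs := by
  intro n
  induction n with
  | zero =>
    intro xs
    have h : pvWhile 0 xs = xs := rfl
    rw [h]
  | succ n ih =>
    intro xs
    have hw : pvWhile (n + 1) xs
        = if (pvPass xs (n + 1)).2 then (pvPass xs (n + 1)).1 else pvWhile n (pvPass xs (n + 1)).1 := by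
      simp only [pvWhile]
    rw [hw]
    by_cases hf : (pvPass xs (n + 1)).2 = true
    · rw [if_pos hf]; exact pvPass_perm (n + 1) xs
    · rw [if_neg hf]; exact (ih _).trans (pvPass_perm (n + 1) xs)

-- the bubble-sort invariant: a sorted, all-larger suffix stays put and the loop sorts the rest
theorem pvWhile_sorted : ∀ (n : Nat) (front back : List (String × (Int × Int × String))),
    front.length = n + 1 →
    back.Pairwise (fun a b => pvKey a ≤ pvKey b) →
    (∀ x ∈ front, ∀ y ∈ back, pvKey x ≤ pvKey y) →
    (pvWhile n (front ++ back)).Pairwise (fun a b => pvKey a ≤ pvKey b) := by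
  intro n
  induction n with
  | zero =>
    intro front back hl hb hc
    match front, hl with
    | [a], _ =>
      have h : pvWhile 0 ([a] ++ back) = a :: back := rfl
      rw [h]
      exact List.Pairwise.cons (fun y hy => hc a (by simp) y hy) hb
  | succ n ih =>
    intro front back hl hb hc
    have hw : pvWhile (n + 1) (front ++ back)
        = if (pvPass front (n + 1)).2 then (pvPass front (n + 1)).1 ++ back
          else pvWhile n ((pvPass front (n + 1)).1 ++ back) := by
      simp only [pvWhile]
      rw [pvPass_split (n + 1) front back (by omega)]
    rw [hw]
    by_cases hf : (pvPass front (n + 1)).2 = true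
    · rw [if_pos hf]
      obtain ⟨h1, h2⟩ := pvPass_noswap (n + 1) front (by omega) hf
      rw [h1]
      exact List.pairwise_append.mpr ⟨h2, hb, fun x hx y hy => hc x hx y hy⟩
    · rw [if_neg hf]
      have hlen : (pvPass front (n + 1)).1.length = n + 2 := by
        rw [(pvPass_perm (n + 1) front).length_eq]; omega
      have hne : (pvPass front (n + 1)).1 ≠ [] := by intro h0; simp [h0] at hlen
      obtain ⟨front', m, hfm⟩ : ∃ front' m, (pvPass front (n + 1)).1 = front' ++ [m] :=
        ⟨(pvPass front (n + 1)).1.dropLast, (pvPass front (n + 1)).1.getLast hne,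
          ((pvPass front (n + 1)).1.dropLast_append_getLast hne).symm⟩
      have hfl : front'.length = n + 1 := by
        have h3 := hlen; rw [hfm] at h3; simp at h3; omega
      have hmem : ∀ x ∈ (pvPass front (n + 1)).1, x ∈ front := by
        intro x hx; exact ((pvPass_perm (n + 1) front).mem_iff).mp hx
      have hmax : ∀ x ∈ front', pvKey x ≤ pvKey m :=
        pvPass_max (n + 1) front front' m (by omega) hfm
      have hmmem : m ∈ front := hmem m (by rw [hfm]; simp)
      rw [hfm, List.append_assoc]
      exact ih front' (m :: back) hfl
        (List.Pairwise.cons (fun y hy => hc m hmmem y hy) hb)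
        (fun x hx y hy => by
          have hxf : x ∈ front := hmem x (by rw [hfm]; exact List.mem_append.mpr (Or.inl hx))
          rcases List.mem_cons.mp hy with hy | hy
          · subst hy; exact hmax x hx
          · exact hc x hxf y hy)

-- A's hand-written bubble sort computes exactly Python's sorted(res) under the tuple order
theorem pvSortEq (res : List (String × (Int × Int × String))) :
    ordena_res res = PySem.List.sorted res pvKey false := by
  have hpw : (ordena_res res).Pairwise (fun a b => pvKey a ≤ pvKey b) := by
    cases res with
    | nil => exact List.Pairwise.nil
    | cons a l =>
      unfold ordena_res
      have h2 : (a :: l).length - 1 = l.length := by simp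
      rw [h2]
      have h : (a :: l) = (a :: l) ++ [] := by simp
      rw [h]
      exact pvWhile_sorted l.length (a :: l) [] (by simp) (by simp) (by simp)
  have hperm : (ordena_res res).Perm (PySem.List.sorted res pvKey false) :=
    (pvWhile_perm _ res).trans (PySem.List.sorted_perm res pvKey false).symm
  exact List.Perm.eq_of_pairwise
    (fun a b _ _ h1 h2 => pvKey_inj (le_antisymm h1 h2))
    hpw (PySem.List.sorted_pairwise res pvKey) hperm

theorem pvJoinSingle (sep p : String) : PySem.Str.join sep [p] = p := by
  rw [← String.toList_inj]
  simp [PySem.Str.toList_join, PySem.Chars.join_singleton]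

theorem pvJoinCons (sep p q : String) (rest : List String) :
    PySem.Str.join sep (p :: q :: rest) = p ++ sep ++ PySem.Str.join sep (q :: rest) := by
  rw [← String.toList_inj]
  simp [PySem.Str.toList_join, PySem.Chars.join_cons_cons]

-- the tail of A's formatted output, from position 1 on
def pvTail : (String × (Int × Int × String)) → List (String × (Int × Int × String)) → String
  | x, [] => pvPiece x ++ "]"
  | x, y :: rest => pvPiece x ++ ", " ++ pvTail y rest

theorem pvGetDAppend : ∀ (pre : List (String × (Int × Int × String))) (x : String × (Int × Int × String)) (rest : List (String × (Int × Int × String))),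
    (pre ++ x :: rest).getD pre.length pvD0 = x := by
  intro pre
  induction pre with
  | nil => intro x rest; simp
  | cons p pre ih => intro x rest; simpa using ih x rest

theorem pvFold : ∀ (rest pre : List (String × (Int × Int × String))) (x : String × (Int × Int × String)) (acc : String),
    1 ≤ pre.length →
    (List.range' pre.length (rest.length + 1)).foldl (pvLoopBody (pre ++ x :: rest)) acc
      = acc ++ pvTail x rest := by
  intro rest
  induction rest with
  | nil =>
    intro pre x acc hp
    have h0 : pre.length ≠ 0 := by omega
    simp only [List.length_nil, Nat.zero_add, List.range'_one, List.foldl_cons, List.foldl_nil]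
    simp only [pvLoopBody, if_neg h0, pvGetDAppend]
    rw [if_pos (show pre.length = (pre ++ [x]).length - 1 by simp)]
    rw [← String.toList_inj]
    simp [pvTail, pvPiece]
  | cons y rest ih =>
    intro pre x acc hp
    have hsplit : List.range' pre.length ((y :: rest).length + 1)
        = pre.length :: List.range' (pre.length + 1) (rest.length + 1) := by
      simp [List.range'_succ]
    rw [hsplit, List.foldl_cons]
    have h0 : pre.length ≠ 0 := by omega
    have hne : pre.length ≠ (pre ++ x :: y :: rest).length - 1 := by simp
    have hstep : pvLoopBody (pre ++ x :: y :: rest) acc pre.length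
        = acc ++ (pvPiece x ++ ", ") := by
      simp only [pvLoopBody, if_neg h0, if_neg hne, pvGetDAppend]
      rw [← String.toList_inj]
      simp [pvPiece]
    have hre : pre ++ x :: y :: rest = (pre ++ [x]) ++ y :: rest := by simp
    have hlen : pre.length + 1 = (pre ++ [x]).length := by simp
    rw [hstep, hre, hlen, ih (pre ++ [x]) y (acc ++ (pvPiece x ++ ", ")) (by simp)]
    rw [← String.toList_inj]
    simp [pvTail]

theorem pvTailJoin : ∀ (x : String × (Int × Int × String)) (l : List (String × (Int × Int × String))),
    pvTail x l = PySem.Str.join ", " ((x :: l).map pvPiece) ++ "]" := by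
  intro x l
  induction l generalizing x with
  | nil => simp [pvTail, pvJoinSingle]
  | cons y rest ih =>
    show pvPiece x ++ ", " ++ pvTail y rest = _
    rw [ih y]
    simp only [List.map_cons]
    rw [pvJoinCons]
    rw [← String.toList_inj]
    simp

-- the formatting halves agree on every (already sorted) list
theorem pvFmt (ys : List (String × (Int × Int × String))) :
    (if ys.length = 1 then
      "[" ++ "<" ++ (ys.getD 0 pvD0).1 ++ ":" ++ "(" ++ PySem.Int.toStr (ys.getD 0 pvD0).2.1 ++ ", " ++ PySem.Int.toStr (ys.getD 0 pvD0).2.2.1 ++ ")" ++ "-" ++ (ys.getD 0 pvD0).2.2.2 ++ ">" ++ "]"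
    else (List.range ys.length).foldl (pvLoopBody ys) "")
    = (if ys.length = 0 then "" else "[" ++ PySem.Str.join ", " (ys.map pvPiece) ++ "]") := by
  match ys with
  | [] => simp
  | [a] =>
    rw [if_pos (show ([a] : List (String × (Int × Int × String))).length = 1 by simp),
        if_neg (show ¬ ([a] : List (String × (Int × Int × String))).length = 0 by simp)]
    simp only [List.map_cons, List.map_nil, pvJoinSingle, List.getD_cons_zero]
    rw [← String.toList_inj]
    simp [pvPiece]
  | a :: b :: l =>
    rw [if_neg (by simp), if_neg (by simp)]
    have hrange : List.range (a :: b :: l).length = 0 :: List.range' 1 (l.length + 1) := by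
      simp [List.range_eq_range', List.range'_succ]
    rw [hrange, List.foldl_cons]
    have hstep : pvLoopBody (a :: b :: l) "" 0 = "[" ++ (pvPiece a ++ ", ") := by
      simp only [pvLoopBody, List.getD_cons_zero]
      rw [← String.toList_inj]
      simp [pvPiece]
    have hfold := pvFold l [a] b ("[" ++ (pvPiece a ++ ", ")) (by simp)
    simp only [List.cons_append, List.nil_append, List.length_cons, List.length_nil,
      Nat.zero_add] at hfold
    rw [hstep, hfold]
    rw [pvTailJoin b l]
    simp only [List.map_cons]
    rw [pvJoinCons]
    rw [← String.toList_inj]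
    simp

-- ===== VERDICT (by name: the statement is the Claim_ definition above) =====
theorem resposta_string_spec : Claim_equal_resposta_string := by
  intro res _
  show resposta_string res = resposta_string_alt res
  simp only [resposta_string, resposta_string_alt, pvSortEq]
  exact pvFmt (PySem.List.sorted res pvKey false)
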